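-- pv_equiv track=rewrite | github.com/aghie/parsing-as-pretraining | tree2labels/encoding2multitask.py | to_next_label
-- ===== SOURCE A (Python) =====
-- def to_next_label(labels,n):
--
--     next_labels = []
--     for idl,l in enumerate(labels):
--
--         if n > 0:
--
--             if idl+n > len(labels)-n:
--                 next_labels.append("-EMPTY-")
--             else:
--                 next_labels.append(labels[idl+n])
--
--         else:
--
--             if idl+n < 0:
--                 next_labels.append("-EMPTY-")
--             else:
--                 next_labels.append(labels[idl+n])
--
--     return next_labels
-- ===== SOURCE B (Python) =====
-- def to_next_label(labels, n):
--     L = len(labels)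
--     if n > 0:
--         # positions i survive while i+n <= L-n, so max(0, L-2n+1) of them
--         keep = max(0, L - 2 * n + 1)
--         return labels[n:n + keep] + ["-EMPTY-"] * (L - keep)
--     else:
--         # positions i survive while i+n >= 0, i.e. the last max(0, L+n) of them
--         keep = max(0, L + n)
--         return ["-EMPTY-"] * (L - keep) + labels[:keep]
-- ===== Notes on version B (the rewrite author's own statement) =====
-- stated objective: faster
-- what changed: Computes the number of surviving positions once in closed form and builds the result as one contiguous slice plus one block of '-EMPTY-' padding, replacing A's element-by-element loop with its per-index bounds branch and repeated appends.
import Mathlib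
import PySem

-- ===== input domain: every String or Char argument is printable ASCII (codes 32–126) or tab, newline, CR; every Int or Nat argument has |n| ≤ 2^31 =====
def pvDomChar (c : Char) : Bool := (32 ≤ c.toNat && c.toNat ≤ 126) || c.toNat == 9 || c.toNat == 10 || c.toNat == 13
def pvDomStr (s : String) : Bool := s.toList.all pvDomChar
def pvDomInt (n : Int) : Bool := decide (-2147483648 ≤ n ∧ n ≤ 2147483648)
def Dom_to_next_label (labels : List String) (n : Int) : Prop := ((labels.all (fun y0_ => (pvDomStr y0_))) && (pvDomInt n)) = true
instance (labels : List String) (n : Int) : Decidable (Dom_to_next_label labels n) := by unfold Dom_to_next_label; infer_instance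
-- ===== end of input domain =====

-- B counts the surviving positions once and builds the result as one slice plus one padding block,
-- instead of A's element-by-element loop with a per-index bounds branch.

-- ===== PORT A =====
def to_next_label (labels : List String) (n : Int) : List String :=
  (PySem.List.enumerate labels 0).foldl (fun next_labels p =>
    if n > 0 then
      if p.1 + n > (labels.length : Int) - n then next_labels ++ ["-EMPTY-"]
      else next_labels ++ [PySem.List.pyGetD labels (p.1 + n) ""]
    else
      if p.1 + n < 0 then next_labels ++ ["-EMPTY-"]
      else next_labels ++ [PySem.List.pyGetD labels (p.1 + n) ""]) []

-- ===== PORT B =====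
-- Source B's 'keep' (number of positions whose source index passes the bound) is written inline here
def to_next_label_alt (labels : List String) (n : Int) : List String :=
  if n > 0 then
    PySem.List.slice labels (some n) (some (n + max 0 ((labels.length : Int) - 2*n + 1)))
      ++ List.replicate (((labels.length : Int) - max 0 ((labels.length : Int) - 2*n + 1)).toNat) "-EMPTY-"
  else
    List.replicate (((labels.length : Int) - max 0 ((labels.length : Int) + n)).toNat) "-EMPTY-"
      ++ PySem.List.slice labels none (some (max 0 ((labels.length : Int) + n)))

-- ===== PRECONDITION & SPEC =====
def Spec_to_next_label (labels : List String) (n : Int) (out : List String) : Prop := out = to_next_label_alt labels n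
instance (labels : List String) (n : Int) (out : List String) : Decidable (Spec_to_next_label labels n out) := by unfold Spec_to_next_label; infer_instance

-- ===== CLAIM (what is proved, stated in full; the proofs are below) =====
def Claim_equal_to_next_label : Prop := ∀ (labels : List String) (n : Int), Dom_to_next_label labels n → Spec_to_next_label labels n (to_next_label labels n)

-- ===== LEMMAS AND PROOFS =====

-- the per-index value A appends (proof helper)
def pvG (labels : List String) (n : Int) (i : Int) : String :=
  if n > 0 then
    if i + n > (labels.length : Int) - n then "-EMPTY-"
    else PySem.List.pyGetD labels (i + n) ""
  else
    if i + n < 0 then "-EMPTY-"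
    else PySem.List.pyGetD labels (i + n) ""

theorem to_next_label_eq_map (labels : List String) (n : Int) :
    to_next_label labels n = (PySem.List.enumerate labels 0).map (fun p => pvG labels n p.1) := by
  unfold to_next_label
  have hf : (fun (next_labels : List String) (p : Int × String) =>
      if n > 0 then
        if p.1 + n > (labels.length : Int) - n then next_labels ++ ["-EMPTY-"]
        else next_labels ++ [PySem.List.pyGetD labels (p.1 + n) ""]
      else
        if p.1 + n < 0 then next_labels ++ ["-EMPTY-"]
        else next_labels ++ [PySem.List.pyGetD labels (p.1 + n) ""])
      = (fun acc p => acc ++ [pvG labels n p.1]) := by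
    funext acc p
    unfold pvG
    split_ifs <;> rfl
  rw [hf, PySem.List.foldl_append_singleton_eq_map]
  simp

theorem to_next_label_main (labels : List String) (n : Int) :
    to_next_label labels n = to_next_label_alt labels n := by
  rw [to_next_label_eq_map]
  unfold to_next_label_alt
  by_cases hn : n > 0
  · rw [if_pos hn]
    have h0n : 0 ≤ n := le_of_lt hn
    have h0e : 0 ≤ n + max 0 ((labels.length : Int) - 2*n + 1) := by
      have := le_max_left (0:Int) ((labels.length : Int) - 2*n + 1)
      omega
    rw [PySem.List.slice_toNat labels h0n h0e]
    set a := n.toNat with ha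
    have han : (a : Int) = n := by omega
    set kp := ((n + max 0 ((labels.length : Int) - 2*n + 1)).toNat - a : Nat) with hkp
    have hmx : max 0 ((labels.length : Int) - 2*n + 1) = 0 ∨
        max 0 ((labels.length : Int) - 2*n + 1) = (labels.length : Int) - 2*n + 1 := by
      rcases le_total ((labels.length : Int) - 2*n + 1) 0 with h | h
      · exact Or.inl (max_eq_left h)
      · exact Or.inr (max_eq_right h)
    have hkpv : (kp : Int) = max 0 ((labels.length : Int) - 2*n + 1) := by
      rcases hmx with h | h <;> omega
    -- kp surviving entries all exist in the slice: kp ≤ labels.length - a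
    have hkple : kp ≤ labels.length - a := by
      rcases hmx with h | h <;> omega
    apply List.ext_getElem
    · simp only [List.length_map, PySem.List.length_enumerate, List.length_append,
        List.length_take, List.length_drop, List.length_replicate]
      omega
    · intro i h1 h2
      rw [List.getElem_map, PySem.List.getElem_enumerate]
      simp only [pvG, if_pos hn, Int.zero_add]
      have hiL : i < labels.length := by
        simpa [PySem.List.length_enumerate] using h1
      by_cases hc : (i : Int) + n > (labels.length : Int) - n
      · rw [if_pos hc]
        have hge : ((labels.drop a).take kp).length ≤ i := by
          simp only [List.length_take, List.length_drop]
          omega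
        rw [List.getElem_append_right hge, List.getElem_replicate]
      · rw [if_neg hc]
        have h0 : 0 ≤ (i : Int) + n := by omega
        have hlt : (i : Int) + n < (labels.length : Int) := by omega
        rw [PySem.List.pyGetD_eq_getElem labels _ h0 hlt]
        have hv : i < ((labels.drop a).take kp).length := by
          simp only [List.length_take, List.length_drop]
          omega
        rw [List.getElem_append_left hv, List.getElem_take, List.getElem_drop]
        congr 1
        omega
  · rw [if_neg hn]
    have hb : (0 : Int) ≤ max 0 ((labels.length : Int) + n) := le_max_left _ _
    rw [PySem.List.slice_to labels hb]
    set m := (max 0 ((labels.length : Int) + n)).toNat with hm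
    have hmL : m ≤ labels.length := by omega
    apply List.ext_getElem
    · simp only [List.length_map, PySem.List.length_enumerate, List.length_append,
        List.length_take, List.length_replicate]
      omega
    · intro i h1 h2
      rw [List.getElem_map, PySem.List.getElem_enumerate]
      simp only [pvG, if_neg hn, Int.zero_add]
      have hiL : i < labels.length := by
        simpa [PySem.List.length_enumerate] using h1
      by_cases hc : (i : Int) + n < 0
      · rw [if_pos hc]
        have hlt : i < (List.replicate (((labels.length : Int) - max 0 ((labels.length : Int) + n)).toNat) "-EMPTY-").length := by
          simp only [List.length_replicate]
          omega
        rw [List.getElem_append_left hlt, List.getElem_replicate]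
      · rw [if_neg hc]
        have h0 : 0 ≤ (i : Int) + n := by omega
        have hlt : (i : Int) + n < (labels.length : Int) := by omega
        rw [PySem.List.pyGetD_eq_getElem labels _ h0 hlt]
        have hge : (List.replicate (((labels.length : Int) - max 0 ((labels.length : Int) + n)).toNat) "-EMPTY-").length ≤ i := by
          simp only [List.length_replicate]
          omega
        rw [List.getElem_append_right hge, List.getElem_take]
        congr 1
        simp only [List.length_replicate]
        omega

-- ===== VERDICT (by name: the statement is the Claim_ definition above) =====
theorem to_next_label_spec : Claim_equal_to_next_label := by
  intro labels n _
  exact to_next_label_main labels n
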